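-- pv_equiv track=rewrite | github.com/izanaami/skills | api_test_coverage/analyzer.py | _categorize_api
-- ===== SOURCE A (Python) =====
-- def _categorize_api(api_name):
--     """Categorize Python API based on name patterns"""
--     if any(word in api_name.lower() for word in ['init', 'setup', 'start', 'create']):
--         return 'Initialization'
--     elif any(word in api_name.lower() for word in ['get', 'set', 'fetch', 'update']):
--         return 'Data Access'
--     elif any(word in api_name.lower() for word in ['connect', 'disconnect', 'send', 'receive']):
--         return 'Network'
--     elif any(word in api_name.lower() for word in ['log', 'debug', 'info', 'warn', 'error']):
--         return 'Logging'
--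
--     return 'Other'
-- ===== SOURCE B (Python) =====
-- _KEYWORD_GROUPS = [
--     ['init', 'setup', 'start', 'create'],      # priority 0 -> Initialization
--     ['get', 'set', 'fetch', 'update'],         # priority 1 -> Data Access
--     ['connect', 'disconnect', 'send', 'receive'],  # priority 2 -> Network
--     ['log', 'debug', 'info', 'warn', 'error'],     # priority 3 -> Logging
-- ]
-- _KEYWORDS = [(w, p) for p, ws in enumerate(_KEYWORD_GROUPS) for w in ws]
-- _CATEGORIES = ['Initialization', 'Data Access', 'Network', 'Logging']
--
--
-- def _priority_at(name, i):
--     """Priority of the first keyword starting at position i, or 4 if none."""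
--     for word, pri in _KEYWORDS:
--         if name.startswith(word, i):
--             return pri
--     return 4
--
--
-- def _categorize_api(api_name):
--     """Categorize Python API based on name patterns"""
--     name = api_name.lower()
--     best = 4
--     for i in range(len(name)):
--         best = min(best, _priority_at(name, i))
--     return _CATEGORIES[best] if best < 4 else 'Other'
-- ===== Notes on version B (the rewrite author's own statement) =====
-- stated objective: alternative
-- what changed: Instead of four separate any-substring-in-priority-order tests, B makes one pass over the positions of the lowered name, computes at each position the priority of the first keyword starting there, and folds the minimum priority into an accumulator; the minimal matched priority names the category.
import Mathlib
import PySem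

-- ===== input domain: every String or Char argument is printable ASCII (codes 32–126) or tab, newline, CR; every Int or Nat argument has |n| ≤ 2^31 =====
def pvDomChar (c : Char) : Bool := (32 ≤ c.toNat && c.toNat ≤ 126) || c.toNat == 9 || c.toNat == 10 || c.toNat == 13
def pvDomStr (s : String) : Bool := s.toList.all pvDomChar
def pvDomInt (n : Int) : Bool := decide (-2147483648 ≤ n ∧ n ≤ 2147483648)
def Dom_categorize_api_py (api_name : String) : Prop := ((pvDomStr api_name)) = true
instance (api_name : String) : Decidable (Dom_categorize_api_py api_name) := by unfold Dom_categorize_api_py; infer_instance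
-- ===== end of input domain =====

-- B replaces the four any-substring tests by one left-to-right pass over the positions of the
-- lowered name, folding the minimum priority of a keyword starting at each position (alternative
-- algorithm, same cost).

-- ===== PORT A =====
def categorize_api_py (api_name : String) : String :=
  if ["init", "setup", "start", "create"].any (fun word => PySem.Str.isIn word (PySem.Str.lower api_name)) then
    "Initialization"
  else if ["get", "set", "fetch", "update"].any (fun word => PySem.Str.isIn word (PySem.Str.lower api_name)) then
    "Data Access"
  else if ["connect", "disconnect", "send", "receive"].any (fun word => PySem.Str.isIn word (PySem.Str.lower api_name)) then
    "Network"
  else if ["log", "debug", "info", "warn", "error"].any (fun word => PySem.Str.isIn word (PySem.Str.lower api_name)) then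
    "Logging"
  else
    "Other"

-- ===== PORT B =====
def keywordGroups : List (List (List Char)) :=
  [[ "init".toList, "setup".toList, "start".toList, "create".toList ],
   [ "get".toList, "set".toList, "fetch".toList, "update".toList ],
   [ "connect".toList, "disconnect".toList, "send".toList, "receive".toList ],
   [ "log".toList, "debug".toList, "info".toList, "warn".toList, "error".toList ]]

-- _KEYWORDS = [(w, p) for p, ws in enumerate(_KEYWORD_GROUPS) for w in ws]
def keywords : List (List Char × Nat) :=
  ((keywordGroups.zipIdx).map (fun gp => gp.1.map (fun w => (w, gp.2)))).flatten

def categoriesB : List String := ["Initialization", "Data Access", "Network", "Logging"]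

-- _priority_at: first keyword starting at this position (suffix), else 4
def priorityAt (suffix : List Char) : List (List Char × Nat) → Nat
  | [] => 4
  | (w, p) :: rest => if w.isPrefixOf suffix then p else priorityAt suffix rest

-- the loop 'for i in range(len(name)): best = min(best, _priority_at(name, i))',
-- recursing over the nonempty suffixes name[i:]
def scanBest : List Char → Nat → Nat
  | [], best => best
  | c :: rest, best => scanBest rest (min best (priorityAt (c :: rest) keywords))

def categorize_api_py_alt (api_name : String) : String :=
  let name := PySem.Chars.lower api_name.toList
  let best := scanBest name 4
  if best < 4 then categoriesB.getD best "Other" else "Other"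

-- ===== PRECONDITION & SPEC =====
def Spec_categorize_api_py (api_name : String) (out : String) : Prop := out = categorize_api_py_alt api_name
instance (api_name : String) (out : String) : Decidable (Spec_categorize_api_py api_name out) := by unfold Spec_categorize_api_py; infer_instance

-- ===== CLAIM (what is proved, stated in full; the proofs are below) =====
def Claim_equal_categorize_api_py : Prop := ∀ (api_name : String), Dom_categorize_api_py api_name → Spec_categorize_api_py api_name (categorize_api_py api_name)

-- ===== LEMMAS AND PROOFS =====

-- proof-side helpers: the four keyword groups and the grouped any-prefix / any-substring tests
def grpA : List (List Char) := ["init".toList, "setup".toList, "start".toList, "create".toList]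
def grpB : List (List Char) := ["get".toList, "set".toList, "fetch".toList, "update".toList]
def grpC : List (List Char) := ["connect".toList, "disconnect".toList, "send".toList, "receive".toList]
def grpD : List (List Char) := ["log".toList, "debug".toList, "info".toList, "warn".toList, "error".toList]

def anyPre (ws : List (List Char)) (t : List Char) : Bool := ws.any (fun w => w.isPrefixOf t)
def anyIn (ws : List (List Char)) (t : List Char) : Bool := ws.any (fun w => PySem.Chars.isIn w t)

-- the minimal priority of a keyword occurring anywhere in t (4 if none)
def minPri (t : List Char) : Nat :=
  if anyIn grpA t then 0
  else if anyIn grpB t then 1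
  else if anyIn grpC t then 2
  else if anyIn grpD t then 3
  else 4

theorem priorityAt_append_const (s : List Char) (ws : List (List Char)) (p : Nat)
    (rest : List (List Char × Nat)) :
    priorityAt s (ws.map (fun w => (w, p)) ++ rest)
      = if anyPre ws s then p else priorityAt s rest := by
  induction ws with
  | nil => simp [anyPre]
  | cons w ws ih =>
      simp only [List.map_cons, List.cons_append, priorityAt, ih, anyPre, List.any_cons]
      by_cases h : w.isPrefixOf s <;> simp [h]

theorem priorityAt_keywords (s : List Char) :
    priorityAt s keywords
      = if anyPre grpA s then 0
        else if anyPre grpB s then 1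
        else if anyPre grpC s then 2
        else if anyPre grpD s then 3
        else 4 := by
  have hk : keywords
      = grpA.map (fun w => (w, 0)) ++ (grpB.map (fun w => (w, 1))
        ++ (grpC.map (fun w => (w, 2)) ++ (grpD.map (fun w => (w, 3)) ++ []))) := by rfl
  rw [hk, priorityAt_append_const, priorityAt_append_const, priorityAt_append_const,
    priorityAt_append_const]
  rfl

theorem isIn_cons (w : List Char) (c : Char) (r : List Char) :
    PySem.Chars.isIn w (c :: r) = (w.isPrefixOf (c :: r) || PySem.Chars.isIn w r) := by
  rcases h : PySem.Chars.isIn w (c :: r) with _ | _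
  · rw [PySem.Chars.isIn_eq_false_iff, List.infix_cons_iff] at h
    rw [eq_comm, Bool.or_eq_false_iff]
    constructor
    · rw [← Bool.not_eq_true, List.isPrefixOf_iff_prefix]; exact fun hp => h (Or.inl hp)
    · rw [← Bool.not_eq_true, PySem.Chars.isIn_iff_infix]; exact fun hi => h (Or.inr hi)
  · rw [PySem.Chars.isIn_iff_infix, List.infix_cons_iff] at h
    rcases h with h | h
    · rw [eq_comm, Bool.or_eq_true]; left; rw [List.isPrefixOf_iff_prefix]; exact h
    · rw [eq_comm, Bool.or_eq_true]; right; rw [PySem.Chars.isIn_iff_infix]; exact h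

theorem anyIn_cons (ws : List (List Char)) (c : Char) (r : List Char) :
    anyIn ws (c :: r) = (anyPre ws (c :: r) || anyIn ws r) := by
  simp only [anyIn, anyPre, isIn_cons]
  induction ws with
  | nil => rfl
  | cons w ws ih =>
      simp only [List.any_cons, ih]
      cases w.isPrefixOf (c :: r) <;> cases PySem.Chars.isIn w r <;> simp

theorem minPri_nil : minPri [] = 4 := by decide

theorem minPri_cons (c : Char) (r : List Char) :
    minPri (c :: r) = min (priorityAt (c :: r) keywords) (minPri r) := by
  rw [priorityAt_keywords]
  simp only [minPri, anyIn_cons]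
  by_cases h0 : anyPre grpA (c :: r) <;>
    by_cases h1 : anyPre grpB (c :: r) <;>
    by_cases h2 : anyPre grpC (c :: r) <;>
    by_cases h3 : anyPre grpD (c :: r) <;>
    simp only [h0, h1, h2, h3, Bool.true_or, Bool.false_or, if_true] <;>
    split_ifs <;> simp_all

theorem scanBest_eq_min (t : List Char) : ∀ best : Nat, best ≤ 4 →
    scanBest t best = min best (minPri t) := by
  induction t with
  | nil => intro best hb; simp [scanBest, minPri_nil]; omega
  | cons c r ih =>
      intro best hb
      rw [scanBest, ih _ (by omega), minPri_cons, Nat.min_assoc]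

theorem anyIn_str (ws : List String) (s : String) :
    ws.any (fun word => PySem.Str.isIn word (PySem.Str.lower s))
      = anyIn (ws.map String.toList) (PySem.Chars.lower s.toList) := by
  simp [anyIn, PySem.Str.isIn, PySem.Str.lower, List.any_map, Function.comp_def]

-- ===== VERDICT (by name: the statement is the Claim_ definition above) =====
theorem categorize_api_py_spec : Claim_equal_categorize_api_py := by
  intro api_name _
  unfold Spec_categorize_api_py categorize_api_py categorize_api_py_alt
  dsimp only
  rw [scanBest_eq_min _ 4 (le_refl 4)]
  rw [anyIn_str, anyIn_str, anyIn_str, anyIn_str]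
  have e0 : (["init", "setup", "start", "create"] : List String).map String.toList = grpA := by rfl
  have e1 : (["get", "set", "fetch", "update"] : List String).map String.toList = grpB := by rfl
  have e2 : (["connect", "disconnect", "send", "receive"] : List String).map String.toList
      = grpC := by rfl
  have e3 : (["log", "debug", "info", "warn", "error"] : List String).map String.toList
      = grpD := by rfl
  rw [e0, e1, e2, e3]
  set t := PySem.Chars.lower api_name.toList with ht
  by_cases g0 : anyIn grpA t <;>
    by_cases g1 : anyIn grpB t <;>
    by_cases g2 : anyIn grpC t <;>
    by_cases g3 : anyIn grpD t <;>
    simp [minPri, g0, g1, g2, g3, categoriesB]
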